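-- pv_equiv track=rewrite | github.com/grm1003/Information-Retrival | ORI-2/modelo-vetorial.py | process_query
-- ===== SOURCE A (Python) =====
-- def process_query(query):
--     terms = query.split('&')
--     query_dict = {}
--     for term in terms:
--         term = term.strip().lower()
--         if term:
--             if term not in query_dict:
--                 query_dict[term] = 1
--             else:
--                 query_dict[term] += 1
--     return query_dict
-- ===== SOURCE B (Python) =====
-- def process_query(query):
--     cleaned = [t for t in (s.strip().lower() for s in query.split('&')) if t]
--     return {t: cleaned.count(t) for t in dict.fromkeys(cleaned)}
-- ===== Notes on version B (the rewrite author's own statement) =====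
-- stated objective: alternative
-- what changed: B first builds the cleaned term list, then counts each distinct term (first-occurrence order) with list.count over a dict.fromkeys dedup, replacing A's single incremental dict-update loop.
import Mathlib
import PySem

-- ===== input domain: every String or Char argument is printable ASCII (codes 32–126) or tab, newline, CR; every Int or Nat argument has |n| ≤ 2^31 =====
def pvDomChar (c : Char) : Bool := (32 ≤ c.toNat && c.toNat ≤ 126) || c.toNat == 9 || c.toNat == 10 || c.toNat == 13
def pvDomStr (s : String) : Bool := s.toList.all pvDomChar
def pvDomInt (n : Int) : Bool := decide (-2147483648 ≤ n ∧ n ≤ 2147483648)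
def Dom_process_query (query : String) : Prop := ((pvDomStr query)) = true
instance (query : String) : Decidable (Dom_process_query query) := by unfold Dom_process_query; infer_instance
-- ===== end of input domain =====

-- B counts distinct cleaned terms with list.count over a dedup, instead of A's incremental dict-update loop; alternative decomposition, same result.

-- ===== PORT A =====
def process_query (query : String) : List (String × Int) :=
  let terms := (PySem.Chars.splitOn query.toList ['&']).map String.ofList
  let query_dict : PySem.Dict String Int :=
    terms.foldl (fun d t =>
      let term := PySem.Str.lower (PySem.Str.strip t)
      if term ≠ "" then
        if d.contains term = false then d.insert term 1
        else d.insert term (d.getD term 0 + 1)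
      else d) PySem.Dict.empty
  query_dict.items

-- ===== PORT B =====
def process_query_alt (query : String) : List (String × Int) :=
  let cleaned := (((PySem.Chars.splitOn query.toList ['&']).map String.ofList).map
      (fun s => PySem.Str.lower (PySem.Str.strip s))).filter (fun t => t ≠ "")
  (PySem.List.dedup cleaned).map (fun t => (t, (cleaned.count t : Int)))

-- ===== PRECONDITION & SPEC =====
def Spec_process_query (query : String) (out : List (String × Int)) : Prop := out = process_query_alt query
instance (query : String) (out : List (String × Int)) : Decidable (Spec_process_query query out) := by unfold Spec_process_query; infer_instance

-- ===== CLAIM (what is proved, stated in full; the proofs are below) =====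
def Claim_equal_process_query : Prop := ∀ (query : String), Dom_process_query query → Spec_process_query query (process_query query)

-- ===== LEMMAS AND PROOFS =====

-- loop shape: fold with clean + filter inside equals fold over the pre-cleaned, pre-filtered list
theorem pv_fold_filter {α σ : Type} (f : α → α) (p : α → Bool) (g : σ → α → σ)
    (l : List α) (d : σ) :
    l.foldl (fun d t => if p (f t) then g d (f t) else d) d
      = ((l.map f).filter p).foldl g d := by
  induction l generalizing d with
  | nil => rfl
  | cons a l ih =>
    simp only [List.foldl_cons, List.map_cons, List.filter_cons]
    cases h : p (f a)
    · simp [ih]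
    · simp [ih]

-- A's fold equals the plain counting fold over B's `cleaned` list.
theorem pv_A_fold (l : List String) (d : PySem.Dict String Int) :
    l.foldl (fun d t =>
        if PySem.Str.lower (PySem.Str.strip t) ≠ "" then
          if d.contains (PySem.Str.lower (PySem.Str.strip t)) = false then
            d.insert (PySem.Str.lower (PySem.Str.strip t)) 1
          else d.insert (PySem.Str.lower (PySem.Str.strip t))
                 (d.getD (PySem.Str.lower (PySem.Str.strip t)) 0 + 1)
        else d) d
      = ((l.map (fun s => PySem.Str.lower (PySem.Str.strip s))).filter
          (fun t => decide (t ≠ ""))).foldl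
          (fun d t => if d.contains t = false then d.insert t 1
                      else d.insert t (d.getD t 0 + 1)) d := by
  have h := pv_fold_filter (fun s => PySem.Str.lower (PySem.Str.strip s))
    (fun t => decide (t ≠ ""))
    (fun (d : PySem.Dict String Int) t =>
      if d.contains t = false then d.insert t 1
      else d.insert t (d.getD t 0 + 1)) l d
  simpa using h

-- A's branch pair is one insert of getD+1 (first insertion: getD = 0).
theorem pv_branch_eq (d : PySem.Dict String Int) (t : String) :
    (if d.contains t = false then d.insert t 1 else d.insert t (d.getD t 0 + 1))
      = d.insert t (d.getD t 0 + 1) := by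
  by_cases h : d.contains t = true
  · simp [h]
  · have h0 : d.getD t 0 = 0 := by
      have := PySem.Dict.contains_eq_isSome_get? (d := d) (k := t)
      cases hg : d.get? t with
      | none => simp [PySem.Dict.getD, hg]
      | some v => rw [hg] at this; simp [this] at h
    simp [h, h0]

-- the counting fold from the empty dict is Counter(l)
theorem pv_counter_fold (l : List String) :
    l.foldl (fun d t =>
        if d.contains t = false then d.insert t 1
        else d.insert t (d.getD t 0 + 1)) PySem.Dict.empty
      = PySem.Dict.counter l := by
  have hf : (fun (d : PySem.Dict String Int) t =>
      if d.contains t = false then d.insert t 1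
      else d.insert t (d.getD t 0 + 1))
      = (fun (d : PySem.Dict String Int) t => d.insert t (d.getD t 0 + 1)) := by
    funext d t; exact pv_branch_eq d t
  have h1 : l.foldl (fun (d : PySem.Dict String Int) t =>
        if d.contains t = false then d.insert t 1
        else d.insert t (d.getD t 0 + 1)) PySem.Dict.empty
      = l.foldl (fun (d : PySem.Dict String Int) t => d.insert t (d.getD t 0 + 1))
          PySem.Dict.empty :=
    congrArg (fun g : PySem.Dict String Int → String → PySem.Dict String Int =>
      List.foldl g PySem.Dict.empty l) hf
  exact h1.trans (PySem.Dict.foldl_insert_getD_add_one_eq_counter l)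

-- ===== VERDICT (by name: the statement is the Claim_ definition above) =====
theorem process_query_spec : Claim_equal_process_query := by
  intro query _
  unfold Spec_process_query process_query process_query_alt
  simp only [pv_A_fold, pv_counter_fold, PySem.Dict.items_counter,
    PySem.List.dedup_eq_ofList]
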